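-- pv_equiv track=rewrite | github.com/AnirudhNarasimhamurthy/Machine-Learning | Assignment 5/Code/functions_svm.py | subvectors
-- ===== SOURCE A (Python) =====
-- def subvectors(x,y):
--     sum={}
--     for key in x:
--         if key in y:
--             sum[key]=x[key]-y[key]
--         else:
--             sum[key]=x[key]
--     for key in y:
--         if key not in x:
--             sum[key]=-y[key]
--     return sum
-- ===== SOURCE B (Python) =====
-- def subvectors(x, y):
--     # Subtraction as accumulation: stream x's items followed by y's items
--     # negated, and add each (key, value) into an accumulator dict.
--     result = {}
--     for k, v in list(x.items()) + [(k, -v) for k, v in y.items()]: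
--         result[k] = result.get(k, 0) + v
--     return result
-- ===== Notes on version B (the rewrite author's own statement) =====
-- stated objective: alternative
-- what changed: Replaces A's two membership-filtered loops with a Counter-style accumulation: negate y's items, concatenate them after x's items, and fold the single stream into an accumulator with result[k] = result.get(k,0) + v (no membership tests).
import Mathlib
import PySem

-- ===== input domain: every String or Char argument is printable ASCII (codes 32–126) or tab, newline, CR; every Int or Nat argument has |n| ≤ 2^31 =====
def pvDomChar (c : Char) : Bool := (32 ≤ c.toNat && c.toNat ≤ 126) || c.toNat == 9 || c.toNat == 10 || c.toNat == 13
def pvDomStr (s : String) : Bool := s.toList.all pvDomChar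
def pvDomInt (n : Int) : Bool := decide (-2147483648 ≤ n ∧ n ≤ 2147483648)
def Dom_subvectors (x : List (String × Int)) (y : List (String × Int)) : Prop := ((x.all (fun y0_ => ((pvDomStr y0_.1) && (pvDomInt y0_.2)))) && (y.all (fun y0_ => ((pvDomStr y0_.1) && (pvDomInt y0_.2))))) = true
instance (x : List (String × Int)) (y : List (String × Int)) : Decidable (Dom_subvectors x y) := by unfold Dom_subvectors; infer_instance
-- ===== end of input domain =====

-- B replaces A's two membership-filtered loops by a Counter-style accumulation over the single
-- stream of x's items followed by y's negated items; same cost, a different algorithm (no membership tests).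


-- ===== PORT A =====
-- literal transliteration of A: build sum={} by a loop over x's keys (membership test against y),
-- then a second loop over y's keys inserting only the keys not in x.
def subvectors (x : List (String × Int)) (y : List (String × Int)) : List (String × Int) :=
  let xd := PySem.Dict.ofList x
  let yd := PySem.Dict.ofList y
  let s1 := xd.keys.foldl (fun s key =>
      if yd.contains key then s.insert key (xd.getD key 0 - yd.getD key 0)
      else s.insert key (xd.getD key 0)) PySem.Dict.empty
  let s2 := yd.keys.foldl (fun s key =>
      if xd.contains key then s else s.insert key (-(yd.getD key 0))) s1
  s2.items

-- ===== PORT B =====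
-- literal transliteration of B: result = {}; for (k,v) in list(x.items()) + [(k,-v) for (k,v) in y.items()]:
-- result[k] = result.get(k,0) + v
def subvectors_alt (x : List (String × Int)) (y : List (String × Int)) : List (String × Int) :=
  let xd := PySem.Dict.ofList x
  let yd := PySem.Dict.ofList y
  ((xd.items ++ yd.items.map (fun p => (p.1, -p.2))).foldl
      (fun r p => r.insert p.1 (r.getD p.1 0 + p.2)) PySem.Dict.empty).items

-- ===== PRECONDITION & SPEC =====
def Spec_subvectors (x : List (String × Int)) (y : List (String × Int)) (out : List (String × Int)) : Prop := out = subvectors_alt x y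
instance (x : List (String × Int)) (y : List (String × Int)) (out : List (String × Int)) : Decidable (Spec_subvectors x y out) := by unfold Spec_subvectors; infer_instance

-- ===== CLAIM (what is proved, stated in full; the proofs are below) =====
def Claim_equal_subvectors : Prop := ∀ (x : List (String × Int)) (y : List (String × Int)), Dom_subvectors x y → Spec_subvectors x y (subvectors x y)

-- ===== LEMMAS AND PROOFS =====

-- a loop that skips the elements satisfying c is a loop over the filtered list
lemma foldl_skip_if {α β : Type} (c : α → Bool) (f : β → α → β) :
    ∀ (l : List α) (b : β),
      l.foldl (fun s k => if c k then s else f s k) b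
        = (l.filter (fun k => !c k)).foldl f b := by
  intro l
  induction l with
  | nil => intro b; rfl
  | cons k l ih =>
    intro b
    by_cases h : c k = true <;> simp [List.foldl_cons, h, ih]

-- B's accumulation over a block of pairs with FRESH distinct keys is a plain insert loop
lemma foldl_acc_fresh :
    ∀ (l : List (String × Int)) (d : PySem.Dict String Int),
      (∀ p ∈ l, d.contains p.1 = false) → (l.map Prod.fst).Nodup →
      l.foldl (fun r p => r.insert p.1 (r.getD p.1 0 + p.2)) d
        = l.foldl (fun r p => r.insert p.1 p.2) d := by
  intro l
  induction l with
  | nil => intro d _ _; rfl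
  | cons p l ih =>
    intro d hfresh hnd
    simp only [List.foldl_cons]
    have h0 : d.getD p.1 0 = 0 := by
      simp [PySem.Dict.getD, (PySem.Dict.get?_eq_none_iff_contains d p.1).mpr
        (hfresh p (List.mem_cons_self))]
    rw [h0, zero_add]
    apply ih
    · intro q hq
      have hqk : (q.1 == p.1) = false := by
        have hne : q.1 ≠ p.1 := by
          intro h
          have : q.1 ∈ l.map Prod.fst := List.mem_map_of_mem hq
          exact (List.nodup_cons.mp (by simpa using hnd)).1 (h ▸ this)
        simp [hne]
      rw [PySem.Dict.contains_insert]
      simp [hqk, hfresh q (List.mem_cons_of_mem _ hq)]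
    · exact (List.nodup_cons.mp (by simpa using hnd)).2

-- characterisation of the copy-then-adjust loop (B's second segment, started from dict(x))
lemma foldl_sub_items (g : String → Int) :
    ∀ (ls : List String) (d : PySem.Dict String Int), ls.Nodup → d.keys.Nodup →
      (ls.foldl (fun r k => r.insert k (r.getD k 0 - g k)) d).items
        = d.items.map (fun p => if p.1 ∈ ls then (p.1, p.2 - g p.1) else p)
          ++ (ls.filter (fun k => !(d.contains k))).map (fun k => (k, -(g k))) := by
  intro ls
  induction ls with
  | nil => intro d _ _; simp
  | cons k ls ih =>
    intro d hnd hkeys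
    have hk : k ∉ ls := (List.nodup_cons.mp hnd).1
    have hnd' : ls.Nodup := (List.nodup_cons.mp hnd).2
    simp only [List.foldl_cons]
    rw [ih (d.insert k (d.getD k 0 - g k)) hnd' (PySem.Dict.nodup_keys_insert d k _ hkeys)]
    have hfilter : ls.filter (fun k' => !((d.insert k (d.getD k 0 - g k)).contains k'))
        = ls.filter (fun k' => !(d.contains k')) := by
      apply List.filter_congr
      intro a ha
      have hak : (a == k) = false := by
        have : a ≠ k := fun h => hk (h ▸ ha)
        simp [this]
      simp [PySem.Dict.contains_insert, hak]
    by_cases hc : d.contains k = true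
    · rw [PySem.Dict.items_insert_of_contains d _ hc, hfilter, List.map_map]
      have hmap : ∀ p ∈ d.items,
          ((fun p => if p.1 ∈ ls then (p.1, p.2 - g p.1) else p) ∘
            (fun p => if (p.1 == k) = true then (k, d.getD k 0 - g k) else p)) p
          = (fun p => if p.1 ∈ k :: ls then (p.1, p.2 - g p.1) else p) p := by
        intro p hp
        by_cases hpk : p.1 = k
        · have hval : d.getD k 0 = p.2 := by
            have hmem : (k, p.2) ∈ d.items := by
              have : p = (k, p.2) := by rw [← hpk]
              exact this ▸ hp
            exact PySem.Dict.getD_of_mem_items d hmem hkeys 0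
          simp [Function.comp, hpk, hk, hval]
        · have hbk : (p.1 == k) = false := by simp [hpk]
          simp only [Function.comp, hbk, if_false, Bool.false_eq_true, List.mem_cons]
          have : (p.1 = k ∨ p.1 ∈ ls) ↔ p.1 ∈ ls := by
            constructor
            · rintro (h | h); exact absurd h hpk; exact h
            · exact Or.inr
          by_cases hm : p.1 ∈ ls <;> simp [hm, hpk]
      rw [List.map_congr_left hmap]
      have : (k :: ls).filter (fun k' => !(d.contains k')) = ls.filter (fun k' => !(d.contains k')) := by
        simp [hc]
      rw [this]
    · have hc' : d.contains k = false := by simpa using hc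
      have hval : d.getD k 0 = 0 := by
        simp [PySem.Dict.getD, (PySem.Dict.get?_eq_none_iff_contains d k).mpr hc']
      rw [PySem.Dict.items_insert_of_not_contains d _ hc', hfilter, List.map_append]
      have hmap : ∀ p ∈ d.items,
          (fun p => if p.1 ∈ ls then (p.1, p.2 - g p.1) else p) p
          = (fun p => if p.1 ∈ k :: ls then (p.1, p.2 - g p.1) else p) p := by
        intro p hp
        have hpk : p.1 ≠ k := by
          intro h
          have : k ∈ d.keys := h ▸ PySem.Dict.mem_keys_of_mem_items d hp
          rw [PySem.Dict.contains_eq_decide_mem_keys d k] at hc'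
          simp [this] at hc'
        by_cases hm : p.1 ∈ ls <;> simp [hm, hpk]
      rw [List.map_congr_left hmap]
      have hfk : (k :: ls).filter (fun k' => !(d.contains k')) = k :: ls.filter (fun k' => !(d.contains k')) := by
        simp [hc']
      rw [hfk]
      simp [hval, hk]

-- A's two loops agree with the copy-then-adjust loop started from xd, for arbitrary dicts with nodup keys
lemma main_dict (xd yd : PySem.Dict String Int) (hx : xd.keys.Nodup) (hy : yd.keys.Nodup) :
    (yd.keys.foldl (fun s key => if xd.contains key then s else s.insert key (-(yd.getD key 0)))
      (xd.keys.foldl (fun s key =>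
          if yd.contains key then s.insert key (xd.getD key 0 - yd.getD key 0)
          else s.insert key (xd.getD key 0)) PySem.Dict.empty)).items
    = (yd.keys.foldl (fun r k => r.insert k (r.getD k 0 - yd.getD k 0)) xd).items := by
  -- A's first loop: merge the branch into the inserted value
  have hf1 : (fun (s : PySem.Dict String Int) key =>
        if yd.contains key then s.insert key (xd.getD key 0 - yd.getD key 0)
        else s.insert key (xd.getD key 0))
      = (fun (s : PySem.Dict String Int) key =>
        s.insert key (if yd.contains key then xd.getD key 0 - yd.getD key 0 else xd.getD key 0)) := by
    funext s key; split <;> rfl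
  rw [hf1]
  have hs1 : (xd.keys.foldl (fun (s : PySem.Dict String Int) key =>
        s.insert key (if yd.contains key then xd.getD key 0 - yd.getD key 0 else xd.getD key 0))
        PySem.Dict.empty).items
      = xd.keys.map (fun key => (key, if yd.contains key then xd.getD key 0 - yd.getD key 0 else xd.getD key 0)) := by
    have := PySem.Dict.items_foldl_insert_fresh xd.keys (fun a => a)
      (fun key => if yd.contains key then xd.getD key 0 - yd.getD key 0 else xd.getD key 0)
      PySem.Dict.empty (by intro a _; simp) (by simpa using hx)
    simpa using this
  -- A's second loop skips keys of xd: it is a loop over the filtered key list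
  rw [foldl_skip_if]
  set s1 := xd.keys.foldl (fun (s : PySem.Dict String Int) key =>
      s.insert key (if yd.contains key then xd.getD key 0 - yd.getD key 0 else xd.getD key 0))
      PySem.Dict.empty with hs1def
  have hkeys1 : s1.keys = xd.keys := by
    show s1.items.map Prod.fst = xd.keys
    rw [hs1]
    simp [Function.comp_def]
  have hfresh : ∀ a ∈ yd.keys.filter (fun k => !(xd.contains k)), s1.contains a = false := by
    intro a ha
    have hax : xd.contains a = false := by
      have := (List.mem_filter.mp ha).2
      simpa using this
    rw [PySem.Dict.contains_eq_decide_mem_keys, hkeys1]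
    rw [PySem.Dict.contains_eq_decide_mem_keys] at hax
    simpa using hax
  have hnodupf : (yd.keys.filter (fun k => !(xd.contains k))).Nodup := hy.filter _
  have hA := PySem.Dict.items_foldl_insert_fresh (yd.keys.filter (fun k => !(xd.contains k)))
    (fun a => a) (fun key => -(yd.getD key 0)) s1 hfresh (by simpa using hnodupf)
  simp only [hA, hs1]
  -- the copy-then-adjust loop
  rw [foldl_sub_items (fun k => yd.getD k 0) yd.keys xd hy hx,
      PySem.Dict.items_eq_map_keys xd hx 0, List.map_map]
  congr 1
  apply List.map_congr_left
  intro a _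
  have : yd.contains a = decide (a ∈ yd.keys) := PySem.Dict.contains_eq_decide_mem_keys yd a
  by_cases hm : a ∈ yd.keys <;> simp [Function.comp, this, hm]

-- B's fold over the concatenated stream equals the copy-then-adjust loop started from xd
lemma alt_eq_adjust (xd yd : PySem.Dict String Int) (hx : xd.keys.Nodup) (hy : yd.keys.Nodup) :
    ((xd.items ++ yd.items.map (fun p => (p.1, -p.2))).foldl
        (fun r p => r.insert p.1 (r.getD p.1 0 + p.2)) PySem.Dict.empty)
      = yd.keys.foldl (fun r k => r.insert k (r.getD k 0 - yd.getD k 0)) xd := by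
  rw [List.foldl_append]
  -- first segment: rebuild xd from empty
  have hseg1 : xd.items.foldl (fun r p => r.insert p.1 (r.getD p.1 0 + p.2)) PySem.Dict.empty = xd := by
    rw [foldl_acc_fresh xd.items PySem.Dict.empty (by intro p _; simp) (by simpa using hx)]
    apply PySem.Dict.ext
    have := PySem.Dict.items_foldl_insert_fresh xd.items Prod.fst Prod.snd
      PySem.Dict.empty (by intro a _; simp) (by simpa using hx)
    simpa using this
  rw [hseg1]
  -- second segment: fold over negated items of yd = fold over yd.keys subtracting
  rw [PySem.Dict.items_eq_map_keys yd hy 0, List.map_map, List.foldl_map]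
  have hfun : (fun (r : PySem.Dict String Int) k =>
        r.insert ((Prod.fst ∘ fun p => (p.1, -p.2)) ((fun k => (k, yd.getD k 0)) k))
          (r.getD ((Prod.fst ∘ fun p => (p.1, -p.2)) ((fun k => (k, yd.getD k 0)) k)) 0
            + (Prod.snd ∘ fun p => (p.1, -p.2)) ((fun k => (k, yd.getD k 0)) k)))
      = (fun (r : PySem.Dict String Int) k => r.insert k (r.getD k 0 - yd.getD k 0)) := by
    funext r k
    simp [Function.comp, sub_eq_add_neg]
  simp only [Function.comp] at hfun ⊢
  rw [hfun]

theorem subvectors_eq_alt (x y : List (String × Int)) : subvectors x y = subvectors_alt x y := by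
  simp only [subvectors, subvectors_alt]
  rw [alt_eq_adjust (PySem.Dict.ofList x) (PySem.Dict.ofList y)
    (PySem.Dict.nodup_keys_ofList x) (PySem.Dict.nodup_keys_ofList y)]
  exact main_dict (PySem.Dict.ofList x) (PySem.Dict.ofList y)
    (PySem.Dict.nodup_keys_ofList x) (PySem.Dict.nodup_keys_ofList y)

-- ===== VERDICT (by name: the statement is the Claim_ definition above) =====
theorem subvectors_spec : Claim_equal_subvectors := by
  intro x y _
  exact subvectors_eq_alt x y
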